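-- pv_equiv track=rewrite | github.com/guoxudong2/comparison | datasets/downstream/CHB_MIT_Scalp_EEG/my_src_codes/preprocess_chb_mit_scalp_eeg.old2.py | cluster_seizures
-- ===== SOURCE A (Python) =====
-- def cluster_seizures(times: list[tuple[int,int]],
--                      lead_len: int = 1800) -> list[list[tuple[int,int]]]:
--     """
--     同一簇判定：上一场 end + 30 min > 下一场 start
--     """
--     if not times:
--         return []
--
--     clusters = [[times[0]]]
--     last_end = times[0][1]                 # 用上一场结束时间做基准
--
--     for s, e in times[1:]:
--         if last_end + lead_len > s:        # 关键比较   ### NEW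
--             clusters[-1].append((s, e))
--         else:
--             clusters.append([(s, e)])      # 开新簇     ### NEW
--         last_end = e                       # 更新基准   ### NEW
--     return clusters
-- ===== SOURCE B (Python) =====
-- def cluster_seizures(times: list[tuple[int, int]],
--                      lead_len: int = 1800) -> list[list[tuple[int, int]]]:
--     # Two-pass decomposition: collect cluster-boundary indices first, then
--     # slice the list along those boundaries (no incremental cluster mutation).
--     if not times:
--         return []
--     cuts = [i for i, ((_, prev_end), (cur_start, _))
--             in enumerate(zip(times, times[1:]), start=1)
--             if prev_end + lead_len <= cur_start]
--     bounds = [0] + cuts + [len(times)]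
--     return [times[a:b] for a, b in zip(bounds, bounds[1:])]
-- ===== Notes on version B (the rewrite author's own statement) =====
-- stated objective: alternative
-- what changed: B computes the cluster-boundary indices in a first pass over adjacent pairs and then slices the input list along those boundaries, instead of A's single pass that mutates clusters[-1] in place.
import Mathlib
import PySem

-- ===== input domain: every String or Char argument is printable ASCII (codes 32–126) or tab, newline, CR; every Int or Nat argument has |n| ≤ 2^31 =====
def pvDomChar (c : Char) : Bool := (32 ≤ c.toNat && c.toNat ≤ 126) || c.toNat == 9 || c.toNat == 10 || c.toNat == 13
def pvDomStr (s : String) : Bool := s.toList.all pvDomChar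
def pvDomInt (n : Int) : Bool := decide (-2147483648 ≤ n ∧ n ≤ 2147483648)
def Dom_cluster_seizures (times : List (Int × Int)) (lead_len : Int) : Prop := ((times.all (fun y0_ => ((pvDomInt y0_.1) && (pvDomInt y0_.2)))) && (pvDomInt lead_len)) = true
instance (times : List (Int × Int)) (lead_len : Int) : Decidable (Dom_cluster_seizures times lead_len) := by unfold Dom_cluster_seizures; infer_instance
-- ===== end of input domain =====

-- B replaces A's single mutating pass by a boundary-index pass plus slicing; same cost, different decomposition.

-- ===== PORT A =====
def cluster_seizures (times : List (Int × Int)) (lead_len : Int) : List (List (Int × Int)) :=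
  match times with
  | [] => []
  | t0 :: _ =>
    ((PySem.List.slice times (some 1) none).foldl
      (fun (st : List (List (Int × Int)) × Int) (te : Int × Int) =>
        ( if st.2 + lead_len > te.1
            then st.1.dropLast ++ [st.1.getLast! ++ [te]]
            else st.1 ++ [[te]],
          te.2))
      ([[t0]], t0.2)).1

-- ===== PORT B =====
def cluster_seizures_alt (times : List (Int × Int)) (lead_len : Int) : List (List (Int × Int)) :=
  if times = [] then []
  else
    let cuts : List Int :=
      ((PySem.List.enumerate (times.zip (PySem.List.slice times (some 1) none)) 1).filter
        (fun p => decide (p.2.1.2 + lead_len ≤ p.2.2.1))).map (fun p => p.1)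
    let bounds : List Int := [0] ++ cuts ++ [(times.length : Int)]
    (bounds.zip bounds.tail).map (fun ab => PySem.List.slice times (some ab.1) (some ab.2))

-- ===== PRECONDITION & SPEC =====
def Spec_cluster_seizures (times : List (Int × Int)) (lead_len : Int) (out : List (List (Int × Int))) : Prop := out = cluster_seizures_alt times lead_len
instance (times : List (Int × Int)) (lead_len : Int) (out : List (List (Int × Int))) : Decidable (Spec_cluster_seizures times lead_len out) := by unfold Spec_cluster_seizures; infer_instance

-- ===== CLAIM (what is proved, stated in full; the proofs are below) =====
def Claim_equal_cluster_seizures : Prop := ∀ (times : List (Int × Int)) (lead_len : Int), Dom_cluster_seizures times lead_len → Spec_cluster_seizures times lead_len (cluster_seizures times lead_len)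

-- ===== LEMMAS AND PROOFS =====

-- the loop body of A (used only in proofs)
def stepA (lead_len : Int) (st : List (List (Int × Int)) × Int) (te : Int × Int) :
    List (List (Int × Int)) × Int :=
  ( if st.2 + lead_len > te.1
      then st.1.dropLast ++ [st.1.getLast! ++ [te]]
      else st.1 ++ [[te]],
    te.2)

-- B's cut indices and adjacent-pair list (used only in proofs)
def cutsD (times : List (Int × Int)) (lead_len : Int) : List Int :=
  ((PySem.List.enumerate (times.zip times.tail) 1).filter
    (fun p => decide (p.2.1.2 + lead_len ≤ p.2.2.1))).map (fun p => p.1)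

def pairsOf {α : Type} (l : List α) : List (α × α) := l.zip l.tail

theorem A_eq (t0 : Int × Int) (rest : List (Int × Int)) (lead_len : Int) :
    cluster_seizures (t0 :: rest) lead_len =
      (rest.foldl (stepA lead_len) ([[t0]], t0.2)).1 := by
  simp only [cluster_seizures, PySem.List.slice_from_one, List.tail_cons]
  rfl

theorem B_eq (times : List (Int × Int)) (lead_len : Int) (h : times ≠ []) :
    cluster_seizures_alt times lead_len =
      (pairsOf ([0] ++ cutsD times lead_len ++ [(times.length : Int)])).map
        (fun ab => PySem.List.slice times (some ab.1) (some ab.2)) := by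
  simp only [cluster_seizures_alt, cutsD, pairsOf, PySem.List.slice_from_one, if_neg h]

theorem pairsOf_snoc {α : Type} (l : List α) (x : α) (h : l ≠ []) :
    pairsOf (l ++ [x]) = pairsOf l ++ [(l.getLast h, x)] := by
  induction l with
  | nil => exact absurd rfl h
  | cons a l ih =>
    cases l with
    | nil => simp [pairsOf]
    | cons c l2 =>
      simp only [pairsOf, List.cons_append, List.zip_cons_cons, List.tail_cons] at *
      simp [ih (by simp)]

theorem cutsD_mem (times : List (Int × Int)) (lead_len : Int) (a : Int)
    (ha : a ∈ cutsD times lead_len) : ∃ k : Nat, a = (k : Int) ∧ 1 ≤ k ∧ k < times.length := by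
  simp only [cutsD, List.mem_map, List.mem_filter] at ha
  obtain ⟨p, ⟨hp, _⟩, rfl⟩ := ha
  rw [PySem.List.mem_enumerate_iff] at hp
  obtain ⟨k, hk, rfl⟩ := hp
  refine ⟨k + 1, by push_cast; ring, by omega, ?_⟩
  rw [List.length_zip] at hk
  simp [List.length_tail] at hk
  omega

theorem cutsD_snoc (xs : List (Int × Int)) (t : Int × Int) (lead_len : Int) (h : xs ≠ []) :
    cutsD (xs ++ [t]) lead_len =
      cutsD xs lead_len ++
        (if (xs.getLast h).2 + lead_len ≤ t.1 then [(xs.length : Int)] else []) := by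
  have hz : (xs ++ [t]).zip ((xs ++ [t]).tail) = xs.zip xs.tail ++ [(xs.getLast h, t)] :=
    pairsOf_snoc xs t h
  have hlen : (xs.zip xs.tail).length = xs.length - 1 := by
    rw [List.length_zip]; simp [List.length_tail]
  simp only [cutsD, hz, PySem.List.enumerate_append, List.filter_append, List.map_append, hlen]
  congr 1
  cases xs with
  | nil => exact absurd rfl h
  | cons x0 xr =>
    simp only [List.length_cons, Nat.add_sub_cancel]
    by_cases hc : (( (x0::xr).getLast h).2 + lead_len ≤ t.1)
    · simp [hc]; ring
    · simp [hc]

theorem slice_append_of_le (xs : List (Int × Int)) (t : Int × Int) (a b : Int)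
    (ha : 0 ≤ a) (hb : 0 ≤ b) (hbn : b ≤ (xs.length : Int)) :
    PySem.List.slice (xs ++ [t]) (some a) (some b) = PySem.List.slice xs (some a) (some b) := by
  rw [PySem.List.slice_toNat _ ha hb, PySem.List.slice_toNat _ ha hb]
  by_cases hab : b.toNat ≤ a.toNat
  · have : b.toNat - a.toNat = 0 := by omega
    simp [this]
  · have haL : a.toNat ≤ xs.length := by omega
    rw [List.drop_append_of_le_length haL]
    rw [List.take_append_of_le_length (by simp [List.length_drop]; omega)]

theorem slice_append_last (xs : List (Int × Int)) (t : Int × Int) (a : Int)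
    (ha : 0 ≤ a) (han : a ≤ (xs.length : Int)) :
    PySem.List.slice (xs ++ [t]) (some a) (some ((xs.length : Int) + 1)) =
      PySem.List.slice xs (some a) (some (xs.length : Int)) ++ [t] := by
  rw [PySem.List.slice_toNat _ ha (by positivity), PySem.List.slice_toNat _ ha (by positivity)]
  have h1 : ((xs.length : Int) + 1).toNat = xs.length + 1 := by omega
  have h2 : ((xs.length : Int)).toNat = xs.length := by omega
  have haL : a.toNat ≤ xs.length := by omega
  rw [h1, h2, List.drop_append_of_le_length haL,
      List.take_of_length_le (by simp; omega), List.take_of_length_le (by simp)]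

theorem snd_foldA (lead_len : Int) (rest : List (Int × Int))
    (c : List (List (Int × Int))) (e : Int) :
    (rest.foldl (stepA lead_len) (c, e)).2 = ((rest.getLast?).map Prod.snd).getD e := by
  induction rest generalizing c e with
  | nil => rfl
  | cons te r ih =>
    rw [List.foldl_cons, ih]
    cases r with
    | nil => rfl
    | cons u r2 =>
      have hg : (u :: r2).getLast? = some ((u :: r2).getLast (by simp)) :=
        List.getLast?_eq_some_getLast (by simp)
      simp [hg]

theorem A_snoc (xs : List (Int × Int)) (t : Int × Int) (lead_len : Int) (h : xs ≠ []) :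
    cluster_seizures (xs ++ [t]) lead_len =
      (stepA lead_len (cluster_seizures xs lead_len, (xs.getLast h).2) t).1 := by
  cases xs with
  | nil => exact absurd rfl h
  | cons t0 rest =>
    rw [List.cons_append, A_eq, List.foldl_append, A_eq]
    simp only [List.foldl_cons, List.foldl_nil]
    have h2 : (List.foldl (stepA lead_len) ([[t0]], t0.2) rest).2 = ((t0 :: rest).getLast h).2 := by
      rw [snd_foldA]
      rcases eq_or_ne rest [] with rfl | hr
      · rfl
      · rw [List.getLast_cons hr, List.getLast?_eq_some_getLast hr]
        rfl
    simp only [stepA, h2]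

theorem mem_of_mem_pairsOf {α : Type} {l : List α} {ab : α × α} (h : ab ∈ pairsOf l) :
    ab.1 ∈ l ∧ ab.2 ∈ l := by
  obtain ⟨h1, h2⟩ := List.of_mem_zip (by exact h)
  exact ⟨h1, List.mem_of_mem_tail h2⟩

theorem bounds_mem (xs : List (Int × Int)) (lead_len : Int) (a : Int)
    (ha : a ∈ ([0] ++ cutsD xs lead_len)) : 0 ≤ a ∧ a ≤ (xs.length : Int) := by
  rcases List.mem_append.1 ha with h0 | hc
  · simp at h0; subst h0; exact ⟨le_refl _, by positivity⟩
  · obtain ⟨k, rfl, h1, h2⟩ := cutsD_mem xs lead_len a hc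
    constructor <;> [positivity; exact_mod_cast le_of_lt h2]

theorem B_snoc (xs : List (Int × Int)) (t : Int × Int) (lead_len : Int) (h : xs ≠ []) :
    cluster_seizures_alt (xs ++ [t]) lead_len =
      (stepA lead_len (cluster_seizures_alt xs lead_len, (xs.getLast h).2) t).1 := by
  have hlen1 : (((xs ++ [t]).length : Int)) = (xs.length : Int) + 1 := by
    simp [List.length_append]
  rw [B_eq (xs ++ [t]) lead_len (by simp), B_eq xs lead_len h, cutsD_snoc xs t lead_len h, hlen1]
  set n : Int := (xs.length : Int) with hn
  set cuts := cutsD xs lead_len with hcuts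
  by_cases hc : (xs.getLast h).2 + lead_len ≤ t.1
  · -- new cluster
    rw [if_pos hc]
    have hb : ([0] ++ (cuts ++ [n]) ++ [n + 1]) = (([0] ++ cuts ++ [n]) ++ [n + 1]) := by simp
    rw [hb, pairsOf_snoc _ _ (by simp)]
    have hgl : (([0] ++ cuts ++ [n])).getLast (by simp) = n := by
      simp
    rw [hgl, List.map_append]
    have hpre : (pairsOf ([0] ++ cuts ++ [n])).map
          (fun ab => PySem.List.slice (xs ++ [t]) (some ab.1) (some ab.2)) =
        (pairsOf ([0] ++ cuts ++ [n])).map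
          (fun ab => PySem.List.slice xs (some ab.1) (some ab.2)) := by
      apply List.map_congr_left
      intro ab hab
      obtain ⟨h1, h2⟩ := mem_of_mem_pairsOf hab
      have b1 : 0 ≤ ab.1 ∧ ab.1 ≤ n := by
        rcases (by simpa using h1 : ab.1 = 0 ∨ ab.1 ∈ cuts ∨ ab.1 = n) with h' | h' | h'
        · rw [h']; exact ⟨le_refl _, by positivity⟩
        · exact bounds_mem xs lead_len ab.1 (by simp; exact Or.inr h')
        · rw [h']; exact ⟨by positivity, le_refl _⟩
      have b2 : 0 ≤ ab.2 ∧ ab.2 ≤ n := by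
        rcases (by simpa using h2 : ab.2 = 0 ∨ ab.2 ∈ cuts ∨ ab.2 = n) with h' | h' | h'
        · rw [h']; exact ⟨le_refl _, by positivity⟩
        · exact bounds_mem xs lead_len ab.2 (by simp; exact Or.inr h')
        · rw [h']; exact ⟨by positivity, le_refl _⟩
      exact slice_append_of_le xs t ab.1 ab.2 b1.1 b2.1 b2.2
    rw [hpre]
    have hlast : PySem.List.slice (xs ++ [t]) (some n) (some (n + 1)) = [t] := by
      rw [slice_append_last xs t n (by positivity) (le_refl _)]
      rw [PySem.List.slice_toNat _ (by positivity) (by positivity)]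
      simp
      omega
    simp only [List.map_cons, List.map_nil, hlast, stepA, if_neg (by omega : ¬ ((xs.getLast h).2 + lead_len > t.1))]
  · -- merge into last cluster
    rw [if_neg hc]
    have hb1 : ([0] ++ (cuts ++ []) ++ [n + 1]) = (([0] ++ cuts) ++ [n + 1]) := by simp
    have hb2 : ([0] ++ cuts ++ [n]) = (([0] ++ cuts) ++ [n]) := by simp
    rw [hb1, hb2, pairsOf_snoc _ _ (by simp), pairsOf_snoc _ _ (by simp), List.map_append, List.map_append]
    set g := ([0] ++ cuts).getLast (by simp) with hg
    have hgmem : g ∈ [0] ++ cuts := List.getLast_mem _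
    have hgb : 0 ≤ g ∧ g ≤ n := bounds_mem xs lead_len g hgmem
    have hpre : (pairsOf ([0] ++ cuts)).map
          (fun ab => PySem.List.slice (xs ++ [t]) (some ab.1) (some ab.2)) =
        (pairsOf ([0] ++ cuts)).map
          (fun ab => PySem.List.slice xs (some ab.1) (some ab.2)) := by
      apply List.map_congr_left
      intro ab hab
      obtain ⟨h1, h2⟩ := mem_of_mem_pairsOf hab
      have b1 := bounds_mem xs lead_len ab.1 h1
      have b2 := bounds_mem xs lead_len ab.2 h2
      exact slice_append_of_le xs t ab.1 ab.2 b1.1 b2.1 b2.2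
    rw [hpre]
    have hlast : PySem.List.slice (xs ++ [t]) (some g) (some (n + 1)) =
        PySem.List.slice xs (some g) (some n) ++ [t] :=
      slice_append_last xs t g hgb.1 hgb.2
    simp only [List.map_cons, List.map_nil, hlast, stepA,
      if_pos (by omega : (xs.getLast h).2 + lead_len > t.1)]
    rw [List.dropLast_concat]
    congr 2
    simp

theorem main_eq (times : List (Int × Int)) (lead_len : Int) :
    cluster_seizures times lead_len = cluster_seizures_alt times lead_len := by
  induction times using List.reverseRecOn with
  | nil => simp [cluster_seizures, cluster_seizures_alt]
  | append_singleton xs t ih =>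
    by_cases hxs : xs = []
    · subst hxs
      simp [cluster_seizures, cluster_seizures_alt, PySem.List.slice, PySem.List.clampIdx]
    · rw [A_snoc xs t lead_len hxs, B_snoc xs t lead_len hxs, ih]

-- ===== VERDICT (by name: the statement is the Claim_ definition above) =====
theorem cluster_seizures_spec : Claim_equal_cluster_seizures := by
  intro times lead_len _
  exact main_eq times lead_len
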